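-- pv_equiv track=rewrite | github.com/Swirl-String-Theory/Swirl-String-Theory | images/saw-shaped-coil-top.py | generate_winding_sequence
-- ===== SOURCE A (Python) =====
-- def generate_winding_sequence(start_node, n_points, step_forward, step_backward, n_steps=20):
--     sequence = [start_node]
--     current = start_node
--     for _ in range(n_steps):
--         # Forward step
--         next_node = (current + step_forward - 1) % n_points + 1
--         sequence.append(next_node)
--         # Backward step
--         current = (next_node - step_backward - 1) % n_points + 1
--         sequence.append(current)
--     return sequence
-- ===== SOURCE B (Python) =====
-- def generate_winding_sequence(start_node, n_points, step_forward, step_backward, n_steps=20):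
--     # Closed-form: each node is derived from the step index k via one modular
--     # expression over a fixed base, instead of threading the previous node.
--     base = start_node - 1
--     net = step_forward - step_backward
--     out = [start_node]
--     for k in range(n_steps):
--         out.append((base + k * net + step_forward) % n_points + 1)
--         out.append((base + (k + 1) * net) % n_points + 1)
--     return out
-- ===== Notes on version B (the rewrite author's own statement) =====
-- stated objective: simpler
-- what changed: Instead of threading the previous node through two interleaved modular updates per iteration, B computes each forward/backward node by a single closed-form modular expression in the step index k over a fixed base offset.
import Mathlib
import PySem

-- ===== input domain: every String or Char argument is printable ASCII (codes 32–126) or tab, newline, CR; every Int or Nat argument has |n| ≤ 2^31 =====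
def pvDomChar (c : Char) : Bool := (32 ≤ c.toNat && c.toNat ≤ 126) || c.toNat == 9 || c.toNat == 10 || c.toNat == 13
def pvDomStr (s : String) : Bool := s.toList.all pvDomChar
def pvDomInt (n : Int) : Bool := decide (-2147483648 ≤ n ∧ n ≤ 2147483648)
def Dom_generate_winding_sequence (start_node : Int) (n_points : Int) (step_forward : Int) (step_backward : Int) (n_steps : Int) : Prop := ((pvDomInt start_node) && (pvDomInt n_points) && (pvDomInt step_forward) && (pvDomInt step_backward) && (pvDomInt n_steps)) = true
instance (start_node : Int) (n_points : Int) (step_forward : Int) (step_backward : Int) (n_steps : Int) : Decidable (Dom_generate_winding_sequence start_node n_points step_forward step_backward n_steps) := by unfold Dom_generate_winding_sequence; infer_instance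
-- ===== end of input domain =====

-- B replaces A's two interleaved node-threading modular updates by one closed-form
-- modular expression per node computed from the step index (objective: simpler).

-- ===== PORT A =====
-- literal transliteration of A: a foldl threading (sequence, current) through n_steps iterations
def generate_winding_sequence (start_node : Int) (n_points : Int) (step_forward : Int) (step_backward : Int) (n_steps : Int) : List Int :=
  ((List.range n_steps.toNat).foldl
    (fun (st : List Int × Int) _ =>
      let next_node := PySem.Int.mod (st.2 + step_forward - 1) n_points + 1
      let current := PySem.Int.mod (next_node - step_backward - 1) n_points + 1
      (st.1 ++ [next_node, current], current))
    ([start_node], start_node)).1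

-- ===== PORT B =====
-- literal transliteration of Source B: each appended node is a closed form in the step index k
def generate_winding_sequence_alt (start_node : Int) (n_points : Int) (step_forward : Int) (step_backward : Int) (n_steps : Int) : List Int :=
  let base := start_node - 1
  let net := step_forward - step_backward
  (List.range n_steps.toNat).foldl
    (fun (out : List Int) (k : Nat) =>
      out ++ [PySem.Int.mod (base + (k : Int) * net + step_forward) n_points + 1,
              PySem.Int.mod (base + ((k : Int) + 1) * net) n_points + 1])
    [start_node]

-- ===== PRECONDITION & SPEC =====
-- Pre_ excludes only the inputs where Python A raises ZeroDivisionError: n_points = 0 with n_steps > 0.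
def Pre_generate_winding_sequence (start_node : Int) (n_points : Int) (step_forward : Int) (step_backward : Int) (n_steps : Int) : Prop :=
  n_points ≠ 0 ∨ n_steps ≤ 0
instance (start_node : Int) (n_points : Int) (step_forward : Int) (step_backward : Int) (n_steps : Int) : Decidable (Pre_generate_winding_sequence start_node n_points step_forward step_backward n_steps) := by unfold Pre_generate_winding_sequence; infer_instance

def pvWitness_generate_winding_sequence : Int × Int × Int × Int × Int := (1, 12, 5, 3, 4)

def Spec_generate_winding_sequence (start_node : Int) (n_points : Int) (step_forward : Int) (step_backward : Int) (n_steps : Int) (out : List Int) : Prop := out = generate_winding_sequence_alt start_node n_points step_forward step_backward n_steps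
instance (start_node : Int) (n_points : Int) (step_forward : Int) (step_backward : Int) (n_steps : Int) (out : List Int) : Decidable (Spec_generate_winding_sequence start_node n_points step_forward step_backward n_steps out) := by unfold Spec_generate_winding_sequence; infer_instance

-- ===== CLAIM (what is proved, stated in full; the proofs are below) =====
def Claim_equal_generate_winding_sequence : Prop := ∀ (start_node : Int) (n_points : Int) (step_forward : Int) (step_backward : Int) (n_steps : Int), Dom_generate_winding_sequence start_node n_points step_forward step_backward n_steps → Pre_generate_winding_sequence start_node n_points step_forward step_backward n_steps → Spec_generate_winding_sequence start_node n_points step_forward step_backward n_steps (generate_winding_sequence start_node n_points step_forward step_backward n_steps)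

-- ===== LEMMAS AND PROOFS =====

-- the two loop bodies, named so the invariant can speak about them
def pvStepA (sf sb n : Int) (st : List Int × Int) (_ : Nat) : List Int × Int :=
  let next_node := PySem.Int.mod (st.2 + sf - 1) n + 1
  let current := PySem.Int.mod (next_node - sb - 1) n + 1
  (st.1 ++ [next_node, current], current)

def pvStepB (s sf sb n : Int) (out : List Int) (k : Nat) : List Int :=
  out ++ [PySem.Int.mod ((s - 1) + (k : Int) * (sf - sb) + sf) n + 1,
          PySem.Int.mod ((s - 1) + ((k : Int) + 1) * (sf - sb)) n + 1]

-- Python's floor-mod absorbs an already-reduced summand (holds for every n, incl. n = 0)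
lemma pv_mod_add_mod (a b n : Int) : PySem.Int.mod (PySem.Int.mod a n + b) n = PySem.Int.mod (a + b) n := by
  simp [PySem.Int.mod]

-- loop invariant: A's accumulated list equals B's, and A's `current` is congruent
-- (mod n_points) to the running closed-form offset
lemma pv_loop_inv (s n sf sb : Int) (m : Nat) :
    ((List.range m).foldl (pvStepA sf sb n) ([s], s)).1 = (List.range m).foldl (pvStepB s sf sb n) [s] ∧
    PySem.Int.mod (((List.range m).foldl (pvStepA sf sb n) ([s], s)).2 + sf - 1) n
      = PySem.Int.mod ((s - 1) + (m : Int) * (sf - sb) + sf) n := by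
  induction m with
  | zero => refine ⟨by simp, ?_⟩; simp; ring_nf
  | succ m ih =>
    rw [List.range_succ, List.foldl_append, List.foldl_append]
    obtain ⟨h1, h2⟩ := ih
    constructor
    · simp only [List.foldl_cons, List.foldl_nil, pvStepA, pvStepB, h1]
      congr 2
      · rw [h2]
      · rw [show PySem.Int.mod (((List.range m).foldl (pvStepA sf sb n) ([s], s)).2 + sf - 1) n + 1 - sb - 1
              = PySem.Int.mod (((List.range m).foldl (pvStepA sf sb n) ([s], s)).2 + sf - 1) n + (-sb) by ring,
            pv_mod_add_mod, show ((List.range m).foldl (pvStepA sf sb n) ([s], s)).2 + sf - 1 + -sb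
              = ((List.range m).foldl (pvStepA sf sb n) ([s], s)).2 + sf - 1 + (-sb) by ring]
        rw [show (s - 1) + ((m : Int) + 1) * (sf - sb) = ((s - 1) + (m : Int) * (sf - sb) + sf) + (-sb) by ring,
            ← pv_mod_add_mod ((s - 1) + (m : Int) * (sf - sb) + sf) (-sb) n, ← h2, pv_mod_add_mod]
    · simp only [List.foldl_cons, List.foldl_nil, pvStepA]
      rw [show PySem.Int.mod (PySem.Int.mod (((List.range m).foldl (pvStepA sf sb n) ([s], s)).2 + sf - 1) n + 1 - sb - 1) n + 1 + sf - 1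
            = PySem.Int.mod (PySem.Int.mod (((List.range m).foldl (pvStepA sf sb n) ([s], s)).2 + sf - 1) n + (1 - sb - 1)) n + (1 + sf - 1) by ring_nf,
          pv_mod_add_mod]
      rw [show ∀ a : Int, a + (1 - sb - 1) + (1 + sf - 1) = a + (-sb + sf) from fun a => by ring,
          pv_mod_add_mod, ← pv_mod_add_mod _ (-sb + sf) n, h2, pv_mod_add_mod]
      congr 1
      push_cast
      ring

-- ===== VERDICT (by name: the statement is the Claim_ definition above) =====
theorem generate_winding_sequence_spec : Claim_equal_generate_winding_sequence := by
  intro s n sf sb ns _ _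
  have h := (pv_loop_inv s n sf sb ns.toNat).1
  unfold pvStepA pvStepB at h
  show generate_winding_sequence s n sf sb ns = generate_winding_sequence_alt s n sf sb ns
  unfold generate_winding_sequence generate_winding_sequence_alt
  exact h
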